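-- pv_equiv track=rewrite | github.com/RathiAbhi/pythonDSA | WaterBasin.py | distribute_rainwater
-- ===== SOURCE A (Python) =====
-- def distribute_rainwater(altitudes):
--     rows, cols = len(altitudes), len(altitudes[0])
--     destination = [[None] * cols for _ in range(rows)]
--     basin_sizes = {}
--
--     directions = [(-1, 0), (1, 0), (0, -1), (0, 1)]
--
--     def find_destination(r, c):
--         if destination[r][c] is not None:
--             return destination[r][c]
--
--         # Assume the current cell is the destination
--         lowest = (r, c)
--         for dr, dc in directions:
--             nr, nc = r + dr, c + dc
--             if 0 <= nr < rows and 0 <= nc < cols and altitudes[nr][nc] < altitudes[lowest[0]][lowest[1]]: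
--                 lowest = (nr, nc)
--
--         # If this cell flows to a lower neighbor, recurse
--         if lowest != (r, c):
--             destination[r][c] = find_destination(lowest[0], lowest[1])
--         else:
--             destination[r][c] = (r, c)
--
--         return destination[r][c]
--
--     # Compute the destination for each cell
--     for r in range(rows):
--         for c in range(cols):
--             find_destination(r, c)
--
--     # Count the size of each basin
--     for r in range(rows):
--         for c in range(cols):
--             basin = destination[r][c]
--             if basin not in basin_sizes:
--                 basin_sizes[basin] = 0
--             basin_sizes[basin] += 1
--
--     # Fill the result grid
--     water_flow = [[basin_sizes[destination[r][c]] for c in range(cols)] for r in range(rows)]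
--     return water_flow
-- ===== SOURCE B (Python) =====
-- def distribute_rainwater(altitudes):
--     rows, cols = len(altitudes), len(altitudes[0])
--     directions = [(-1, 0), (1, 0), (0, -1), (0, 1)]
--
--     # Pass 1: next-pointer for every cell (first strictly-lowest neighbour in scan order).
--     nxt = {}
--     for r in range(rows):
--         for c in range(cols):
--             best = (r, c)
--             for dr, dc in directions:
--                 nr, nc = r + dr, c + dc
--                 if 0 <= nr < rows and 0 <= nc < cols and altitudes[nr][nc] < altitudes[best[0]][best[1]]:
--                     best = (nr, nc)
--             nxt[(r, c)] = best
--
--     # Pass 2: resolve each cell's sink by chasing pointers, caching whole chains.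
--     sink = {}
--     for cell in nxt:
--         chain = []
--         cur = cell
--         while cur not in sink and nxt[cur] != cur:
--             chain.append(cur)
--             cur = nxt[cur]
--         s = sink.get(cur, cur)
--         for p in chain:
--             sink[p] = s
--         sink[cell] = s
--
--     # Pass 3: tally basin sizes and fill the grid.
--     counts = {}
--     for s in sink.values():
--         counts[s] = counts.get(s, 0) + 1
--     return [[counts[sink[(r, c)]] for c in range(cols)] for r in range(rows)]
-- ===== Notes on version B (the rewrite author's own statement) =====
-- stated objective: alternative
-- what changed: Replaces A's memoized recursive flow-following with three flat passes: build an explicit next-pointer grid, resolve sinks by iterative pointer chasing with whole-chain caching (no recursion), then tally sink counts.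
import Mathlib
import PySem

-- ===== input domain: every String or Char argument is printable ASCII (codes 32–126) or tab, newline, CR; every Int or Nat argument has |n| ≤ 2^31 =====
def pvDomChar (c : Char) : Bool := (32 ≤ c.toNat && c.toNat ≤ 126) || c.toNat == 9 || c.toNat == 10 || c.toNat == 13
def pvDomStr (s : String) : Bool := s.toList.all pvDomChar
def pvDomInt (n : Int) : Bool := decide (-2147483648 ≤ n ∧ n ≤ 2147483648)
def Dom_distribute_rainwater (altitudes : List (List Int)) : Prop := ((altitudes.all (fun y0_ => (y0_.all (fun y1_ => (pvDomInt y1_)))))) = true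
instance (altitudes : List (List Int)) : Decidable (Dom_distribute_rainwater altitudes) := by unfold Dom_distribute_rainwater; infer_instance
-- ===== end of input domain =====

-- B replaces A's memoized recursion by three flat passes (next-pointer grid, iterative
-- pointer chasing with chain caching, tally) — an alternative decomposition, same cost.


-- ===== PORT A =====
-- altitudes[p.1][p.2]; only evaluated under in-range guards inside Pre_, where the
-- defaults are never used.
def drAltA (altitudes : List (List Int)) (p : Int × Int) : Int :=
  (PySem.List.pyGet? ((PySem.List.pyGet? altitudes p.1).getD []) p.2).getD 0

-- the scan of the four directions inside find_destination (first strictly-lower wins)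
def drLowestA (altitudes : List (List Int)) (rows cols r c : Int) : Int × Int :=
  [((-1 : Int), (0 : Int)), (1, 0), (0, -1), (0, 1)].foldl
    (fun lowest d =>
      if 0 ≤ r + d.1 ∧ r + d.1 < rows ∧ 0 ≤ c + d.2 ∧ c + d.2 < cols ∧
          drAltA altitudes (r + d.1, c + d.2) < drAltA altitudes lowest
      then (r + d.1, c + d.2) else lowest)
    (r, c)

-- find_destination with its memo table `destination`: the 2D table of None/(r,c) is a
-- dict keyed by the (always in-range) pair (r,c), `is not None` ↔ key present — exact.
-- `fuel` is a pure totality guard (chains strictly decrease in altitude, so with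
-- fuel = rows*cols the 0 case is never reached).
def drFindA (altitudes : List (List Int)) (rows cols : Int) :
    Nat → Int × Int → PySem.Dict (Int × Int) (Int × Int) →
    (Int × Int) × PySem.Dict (Int × Int) (Int × Int)
  | fuel, p, dest =>
    match dest.get? p with
    | some v => (v, dest)
    | none =>
      let lowest := drLowestA altitudes rows cols p.1 p.2
      if lowest ≠ p then
        match fuel with
        | 0 => (p, dest)
        | fuel' + 1 =>
          let res := drFindA altitudes rows cols fuel' lowest dest
          (res.1, res.2.insert p res.1)
      else (p, dest.insert p p)

def distribute_rainwater (altitudes : List (List Int)) : List (List Int) :=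
  let rows : Int := altitudes.length
  let cols : Int := (altitudes.headD []).length
  let fuel : Nat := rows.toNat * cols.toNat
  let dest := (PySem.List.pyRange 0 rows 1).foldl (fun d r =>
      (PySem.List.pyRange 0 cols 1).foldl (fun d c =>
        (drFindA altitudes rows cols fuel (r, c) d).2) d) PySem.Dict.empty
  let sizes := (PySem.List.pyRange 0 rows 1).foldl (fun bs r =>
      (PySem.List.pyRange 0 cols 1).foldl (fun bs c =>
        let basin := (dest.get? (r, c)).getD (r, c)
        let bs' := if bs.contains basin then bs else bs.insert basin (0 : Int)
        bs'.insert basin (bs'.getD basin 0 + 1)) bs) PySem.Dict.empty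
  (PySem.List.pyRange 0 rows 1).map (fun r =>
    (PySem.List.pyRange 0 cols 1).map (fun c =>
      (sizes.get? ((dest.get? (r, c)).getD (r, c))).getD 0))

-- ===== PORT B =====
def drAltB (altitudes : List (List Int)) (p : Int × Int) : Int :=
  (PySem.List.pyGet? ((PySem.List.pyGet? altitudes p.1).getD []) p.2).getD 0

-- pass 1 scan: first strictly-lowest neighbour in the same direction order
def drLowestB (altitudes : List (List Int)) (rows cols r c : Int) : Int × Int :=
  [((-1 : Int), (0 : Int)), (1, 0), (0, -1), (0, 1)].foldl
    (fun best d =>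
      if 0 ≤ r + d.1 ∧ r + d.1 < rows ∧ 0 ≤ c + d.2 ∧ c + d.2 < cols ∧
          drAltB altitudes (r + d.1, c + d.2) < drAltB altitudes best
      then (r + d.1, c + d.2) else best)
    (r, c)

def drNxt (altitudes : List (List Int)) (rows cols : Int) :
    PySem.Dict (Int × Int) (Int × Int) :=
  (PySem.List.pyRange 0 rows 1).foldl (fun d r =>
    (PySem.List.pyRange 0 cols 1).foldl (fun d c =>
      d.insert (r, c) (drLowestB altitudes rows cols r c)) d) PySem.Dict.empty

-- the pass-2 while loop; fuel = rows*cols is a pure totality guard, never exhausted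
def drChase (nxt sink : PySem.Dict (Int × Int) (Int × Int)) :
    Nat → Int × Int → List (Int × Int) → (Int × Int) × List (Int × Int)
  | fuel, cur, chain =>
    if ¬ sink.contains cur ∧ (nxt.getD cur cur) ≠ cur then
      match fuel with
      | 0 => (cur, chain)
      | fuel' + 1 => drChase nxt sink fuel' (nxt.getD cur cur) (chain ++ [cur])
    else (cur, chain)

def distribute_rainwater_alt (altitudes : List (List Int)) : List (List Int) :=
  let rows : Int := altitudes.length
  let cols : Int := (altitudes.headD []).length
  let fuel : Nat := rows.toNat * cols.toNat
  let nxt := drNxt altitudes rows cols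
  let sink := nxt.keys.foldl (fun sink cell =>
      let cc := drChase nxt sink fuel cell []
      let s := (sink.get? cc.1).getD cc.1
      let sink' := cc.2.foldl (fun sk p => sk.insert p s) sink
      sink'.insert cell s) PySem.Dict.empty
  let counts := sink.values.foldl (fun cnt s => cnt.insert s (cnt.getD s 0 + 1))
      (PySem.Dict.empty : PySem.Dict (Int × Int) Int)
  (PySem.List.pyRange 0 rows 1).map (fun r =>
    (PySem.List.pyRange 0 cols 1).map (fun c =>
      (counts.get? ((sink.get? (r, c)).getD (r, c))).getD 0))

-- ===== PRECONDITION & SPEC =====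
-- Python A raises IndexError exactly when altitudes is empty (altitudes[0]) or some row
-- is shorter than the first row (altitudes[nr][nc] inside the scan); Pre_ excludes
-- exactly those inputs.
def Pre_distribute_rainwater (altitudes : List (List Int)) : Prop :=
  altitudes ≠ [] ∧ ∀ row ∈ altitudes, (altitudes.headD []).length ≤ row.length
instance (altitudes : List (List Int)) : Decidable (Pre_distribute_rainwater altitudes) := by
  unfold Pre_distribute_rainwater; infer_instance

def pvWitness_distribute_rainwater : List (List Int) := [[3, 1], [2, 4]]

def Spec_distribute_rainwater (altitudes : List (List Int)) (out : List (List Int)) : Prop :=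
  out = distribute_rainwater_alt altitudes
instance (altitudes : List (List Int)) (out : List (List Int)) :
    Decidable (Spec_distribute_rainwater altitudes out) := by
  unfold Spec_distribute_rainwater; infer_instance

-- ===== CLAIM (what is proved, stated in full; the proofs are below) =====
def Claim_equal_distribute_rainwater : Prop :=
  ∀ (altitudes : List (List Int)), Dom_distribute_rainwater altitudes →
    Pre_distribute_rainwater altitudes →
    Spec_distribute_rainwater altitudes (distribute_rainwater altitudes)

-- ===== LEMMAS AND PROOFS =====

def drValid (rows cols : Int) (p : Int × Int) : Prop :=
  0 ≤ p.1 ∧ p.1 < rows ∧ 0 ≤ p.2 ∧ p.2 < cols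

def drCells (rows cols : Int) : List (Int × Int) :=
  (PySem.List.pyRange 0 rows 1).product (PySem.List.pyRange 0 cols 1)

def drCellsF (rows cols : Int) : Finset (Int × Int) :=
  (drCells rows cols).toFinset

def drM (al : List (List Int)) (rows cols : Int) (p : Int × Int) : Nat :=
  ((drCellsF rows cols).filter (fun q => drAltA al q < drAltA al p)).card

lemma drMem_cells (rows cols : Int) (p : Int × Int) :
    p ∈ drCells rows cols ↔ drValid rows cols p := by
  obtain ⟨a, b⟩ := p
  simp [drCells, List.pair_mem_product, PySem.List.mem_pyRange_one, drValid, and_assoc]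

lemma drMem_cellsF (rows cols : Int) (p : Int × Int) :
    p ∈ drCellsF rows cols ↔ drValid rows cols p := by
  rw [drCellsF, List.mem_toFinset, drMem_cells]

lemma drNodup_cells (rows cols : Int) : (drCells rows cols).Nodup :=
  List.Nodup.product (PySem.List.nodup_pyRange_one 0 rows) (PySem.List.nodup_pyRange_one 0 cols)

lemma drCard_cellsF (rows cols : Int) :
    (drCellsF rows cols).card = rows.toNat * cols.toNat := by
  rw [drCellsF, List.toFinset_card_of_nodup (drNodup_cells rows cols)]
  simp [drCells, List.product, List.length_flatMap, PySem.List.length_pyRange_one]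

lemma drM_le (al : List (List Int)) (rows cols : Int) (p : Int × Int) :
    drM al rows cols p ≤ rows.toNat * cols.toNat := by
  rw [← drCard_cellsF rows cols]; exact Finset.card_filter_le _ _

lemma drLowest_inv (al : List (List Int)) (rows cols r c : Int) (ds : List (Int × Int))
    (l : Int × Int)
    (h : l = (r, c) ∨ (drValid rows cols l ∧ drAltA al l < drAltA al (r, c))) :
    (ds.foldl
      (fun lowest d =>
        if 0 ≤ r + d.1 ∧ r + d.1 < rows ∧ 0 ≤ c + d.2 ∧ c + d.2 < cols ∧
            drAltA al (r + d.1, c + d.2) < drAltA al lowest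
        then (r + d.1, c + d.2) else lowest) l) = (r, c) ∨
      (drValid rows cols (ds.foldl
        (fun lowest d =>
          if 0 ≤ r + d.1 ∧ r + d.1 < rows ∧ 0 ≤ c + d.2 ∧ c + d.2 < cols ∧
              drAltA al (r + d.1, c + d.2) < drAltA al lowest
          then (r + d.1, c + d.2) else lowest) l) ∧
        drAltA al (ds.foldl
          (fun lowest d =>
            if 0 ≤ r + d.1 ∧ r + d.1 < rows ∧ 0 ≤ c + d.2 ∧ c + d.2 < cols ∧
                drAltA al (r + d.1, c + d.2) < drAltA al lowest
            then (r + d.1, c + d.2) else lowest) l) < drAltA al (r, c)) := by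
  induction ds generalizing l with
  | nil => exact h
  | cons d ds ih =>
    simp only [List.foldl_cons]
    apply ih
    split_ifs with hc
    · right
      refine ⟨⟨hc.1, hc.2.1, hc.2.2.1, hc.2.2.2.1⟩, ?_⟩
      rcases h with rfl | ⟨_, hlt⟩
      · exact hc.2.2.2.2
      · exact lt_trans hc.2.2.2.2 hlt
    · exact h

lemma drLowest_spec (al : List (List Int)) (rows cols r c : Int) :
    drLowestA al rows cols r c = (r, c) ∨
      (drValid rows cols (drLowestA al rows cols r c) ∧
        drAltA al (drLowestA al rows cols r c) < drAltA al (r, c)) :=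
  drLowest_inv al rows cols r c _ (r, c) (Or.inl rfl)

lemma drM_next_lt (al : List (List Int)) (rows cols : Int) (p : Int × Int)
    (h : drLowestA al rows cols p.1 p.2 ≠ p) :
    drM al rows cols (drLowestA al rows cols p.1 p.2) < drM al rows cols p := by
  rcases drLowest_spec al rows cols p.1 p.2 with heq | ⟨hv, hlt⟩
  · exact absurd (by simpa using heq) h
  have hlt' : drAltA al (drLowestA al rows cols p.1 p.2) < drAltA al p := by
    simpa using hlt
  have hsub : (drCellsF rows cols).filter
      (fun q => drAltA al q < drAltA al (drLowestA al rows cols p.1 p.2)) ⊆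
      (drCellsF rows cols).filter (fun q => drAltA al q < drAltA al p) := by
    intro x hx
    rw [Finset.mem_filter] at hx ⊢
    exact ⟨hx.1, lt_trans hx.2 hlt'⟩
  apply Finset.card_lt_card
  rw [Finset.ssubset_iff_of_subset hsub]
  refine ⟨drLowestA al rows cols p.1 p.2, ?_, ?_⟩
  · rw [Finset.mem_filter]
    exact ⟨(drMem_cellsF rows cols _).mpr hv, hlt'⟩
  · rw [Finset.mem_filter]
    simp

def drSink (al : List (List Int)) (rows cols : Int) (p : Int × Int) : Int × Int :=
  if h : drLowestA al rows cols p.1 p.2 = p then p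
  else drSink al rows cols (drLowestA al rows cols p.1 p.2)
termination_by drM al rows cols p
decreasing_by exact drM_next_lt al rows cols p h

lemma drSink_self (al : List (List Int)) (rows cols : Int) (p : Int × Int)
    (h : drLowestA al rows cols p.1 p.2 = p) : drSink al rows cols p = p := by
  rw [drSink, dif_pos h]

lemma drSink_step (al : List (List Int)) (rows cols : Int) (p : Int × Int)
    (h : drLowestA al rows cols p.1 p.2 ≠ p) :
    drSink al rows cols p = drSink al rows cols (drLowestA al rows cols p.1 p.2) := by
  rw [drSink, dif_neg h]

lemma drSink_valid (al : List (List Int)) (rows cols : Int) (p : Int × Int)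
    (hv : drValid rows cols p) : drValid rows cols (drSink al rows cols p) := by
  by_cases h : drLowestA al rows cols p.1 p.2 = p
  · rw [drSink_self al rows cols p h]; exact hv
  · rw [drSink_step al rows cols p h]
    rcases drLowest_spec al rows cols p.1 p.2 with heq | ⟨hv', _⟩
    · exact absurd (by simpa using heq) h
    · exact drSink_valid al rows cols _ hv'
termination_by drM al rows cols p
decreasing_by exact drM_next_lt al rows cols p h

def drInv (al : List (List Int)) (rows cols : Int)
    (d : PySem.Dict (Int × Int) (Int × Int)) : Prop :=
  ∀ p v, d.get? p = some v → v = drSink al rows cols p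

lemma drFindA_spec (al : List (List Int)) (rows cols : Int) :
    ∀ (fuel : Nat) (p : Int × Int) (dest : PySem.Dict (Int × Int) (Int × Int)),
      drInv al rows cols dest → drM al rows cols p ≤ fuel →
      (drFindA al rows cols fuel p dest).1 = drSink al rows cols p ∧
      drInv al rows cols (drFindA al rows cols fuel p dest).2 ∧
      (∀ q w, dest.get? q = some w → (drFindA al rows cols fuel p dest).2.get? q = some w) ∧
      (drFindA al rows cols fuel p dest).2.get? p = some (drSink al rows cols p) := by
  intro fuel
  induction fuel with
  | zero =>
    intro p dest hI hm
    cases hget : dest.get? p with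
    | some v =>
      have hv := hI p v hget
      simp only [drFindA, hget]
      exact ⟨hv, hI, fun q w h => h, by simp [hv]⟩
    | none =>
      by_cases hq : drLowestA al rows cols p.1 p.2 = p
      · simp only [drFindA, hget, hq, ne_eq, not_true_eq_false, if_false]
        refine ⟨(drSink_self al rows cols p hq).symm, ?_, ?_, ?_⟩
        · intro q w h
          rw [PySem.Dict.get?_insert] at h
          split_ifs at h with he
          · subst he; rw [drSink_self al rows cols q hq]; exact (Option.some_inj.mp h).symm
          · exact hI q w h
        · intro q w h
          rw [PySem.Dict.get?_insert]
          split_ifs with he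
          · subst he; rw [hget] at h; exact absurd h (by simp)
          · exact h
        · rw [PySem.Dict.get?_insert_self, drSink_self al rows cols p hq]
      · exfalso
        have := drM_next_lt al rows cols p hq
        omega
  | succ fuel ih =>
    intro p dest hI hm
    cases hget : dest.get? p with
    | some v =>
      have hv := hI p v hget
      have hEq : drFindA al rows cols (fuel + 1) p dest = (v, dest) := by
        conv_lhs => rw [drFindA]
        simp only [hget]
      rw [hEq]
      exact ⟨hv, hI, fun q w h => h, by rw [show ((v, dest) : (Int × Int) × PySem.Dict (Int × Int) (Int × Int)).2 = dest from rfl, hget, hv]⟩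
    | none =>
      by_cases hq : drLowestA al rows cols p.1 p.2 = p
      · have hEq : drFindA al rows cols (fuel + 1) p dest = (p, dest.insert p p) := by
          conv_lhs => rw [drFindA]
          simp only [hget, hq, ne_eq, not_true_eq_false, if_false]
        rw [hEq]
        refine ⟨(drSink_self al rows cols p hq).symm, ?_, ?_, ?_⟩
        · intro q w h
          rw [PySem.Dict.get?_insert] at h
          split_ifs at h with he
          · subst he; rw [drSink_self al rows cols q hq]; exact (Option.some_inj.mp h).symm
          · exact hI q w h
        · intro q w h
          rw [PySem.Dict.get?_insert]
          split_ifs with he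
          · subst he; rw [hget] at h; exact absurd h (by simp)
          · exact h
        · rw [PySem.Dict.get?_insert_self, drSink_self al rows cols p hq]
      · have hmk : drM al rows cols (drLowestA al rows cols p.1 p.2) ≤ fuel := by
          have := drM_next_lt al rows cols p hq
          omega
        obtain ⟨h1, h2, h3, h4⟩ := ih (drLowestA al rows cols p.1 p.2) dest hI hmk
        have hsp : drSink al rows cols p
            = drSink al rows cols (drLowestA al rows cols p.1 p.2) :=
          drSink_step al rows cols p hq
        have hEq : drFindA al rows cols (fuel + 1) p dest
            = ((drFindA al rows cols fuel (drLowestA al rows cols p.1 p.2) dest).1,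
              (drFindA al rows cols fuel (drLowestA al rows cols p.1 p.2) dest).2.insert p
                (drFindA al rows cols fuel (drLowestA al rows cols p.1 p.2) dest).1) := by
          conv_lhs => rw [drFindA]
          simp only [hget, hq, ne_eq, not_false_eq_true, if_true]
        rw [hEq]
        refine ⟨by rw [h1, hsp], ?_, ?_, ?_⟩
        · intro q w h
          rw [PySem.Dict.get?_insert] at h
          split_ifs at h with he
          · subst he
            rw [← Option.some_inj.mp h, h1, hsp]
          · exact h2 q w h
        · intro q w h
          rw [PySem.Dict.get?_insert]
          split_ifs with he
          · subst he; rw [hget] at h; exact absurd h (by simp)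
          · exact h3 q w h
        · rw [PySem.Dict.get?_insert_self, h1, hsp]

-- A's per-cell counting step is the plain counter step
lemma drCstep_eq (bs : PySem.Dict (Int × Int) Int) (b : Int × Int) :
    ((if bs.contains b then bs else bs.insert b (0 : Int)).insert b
        ((if bs.contains b then bs else bs.insert b (0 : Int)).getD b 0 + 1))
      = bs.insert b (bs.getD b 0 + 1) := by
  by_cases h : bs.contains b
  · simp [h]
  · simp only [h, Bool.false_eq_true, if_false]
    rw [PySem.Dict.getD_insert_self, PySem.Dict.insert_insert_self,
      PySem.Dict.getD_of_not_contains bs 0 (by simpa using h)]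

lemma drNested_foldl {σ : Type} (f : σ → Int → Int → σ) (rs cs : List Int) (init : σ) :
    rs.foldl (fun d r => cs.foldl (fun d c => f d r c) d) init
      = (rs.product cs).foldl (fun d p => f d p.1 p.2) init := by
  induction rs generalizing init with
  | nil => rfl
  | cons r rs ih =>
    simp only [List.foldl_cons, ih]
    rw [show (r :: rs).product cs = cs.map (r, ·) ++ rs.product cs by simp [List.product],
      List.foldl_append, List.foldl_map]

lemma drGet?_foldl_insert (g : Int × Int → Int × Int) (l : List (Int × Int))
    (d : PySem.Dict (Int × Int) (Int × Int)) (q : Int × Int) :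
    (l.foldl (fun d p => d.insert p (g p)) d).get? q
      = if q ∈ l then some (g q) else d.get? q := by
  induction l generalizing d with
  | nil => simp
  | cons p l ih =>
    simp only [List.foldl_cons, ih, PySem.Dict.get?_insert, List.mem_cons]
    by_cases hl : q ∈ l
    · simp [hl]
    · by_cases hp : q = p <;> simp [hl, hp]

lemma drDestLoop (al : List (List Int)) (rows cols : Int) (l : List (Int × Int))
    (dest : PySem.Dict (Int × Int) (Int × Int)) (hI : drInv al rows cols dest) :
    drInv al rows cols
      (l.foldl (fun d p => (drFindA al rows cols (rows.toNat * cols.toNat) p d).2) dest) ∧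
    (∀ q w, dest.get? q = some w →
      (l.foldl (fun d p => (drFindA al rows cols (rows.toNat * cols.toNat) p d).2) dest).get? q
        = some w) ∧
    ∀ p ∈ l,
      (l.foldl (fun d p => (drFindA al rows cols (rows.toNat * cols.toNat) p d).2) dest).get? p
        = some (drSink al rows cols p) := by
  induction l generalizing dest with
  | nil => exact ⟨hI, fun q w h => h, by simp⟩
  | cons p l ih =>
    obtain ⟨h1, h2, h3, h4⟩ :=
      drFindA_spec al rows cols (rows.toNat * cols.toNat) p dest hI (drM_le al rows cols p)
    obtain ⟨g1, g2, g3⟩ := ih _ h2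
    refine ⟨g1, ?_, ?_⟩
    · intro q w hq
      exact g2 q w (h3 q w hq)
    · intro x hx
      rcases List.mem_cons.mp hx with rfl | hx
      · exact g2 x _ h4
      · exact g3 x hx

def drOut (al : List (List Int)) (rows cols : Int) : List (List Int) :=
  (PySem.List.pyRange 0 rows 1).map fun r =>
    (PySem.List.pyRange 0 cols 1).map fun c =>
      (((drCells rows cols).map (drSink al rows cols)).count (drSink al rows cols (r, c)) : Int)

lemma drEmptyInv (al : List (List Int)) (rows cols : Int) :
    drInv al rows cols PySem.Dict.empty := by
  intro p v h
  rw [PySem.Dict.get?_empty] at h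
  cases h

def drDest0 (al : List (List Int)) (rows cols : Int) : PySem.Dict (Int × Int) (Int × Int) :=
  (PySem.List.pyRange 0 rows 1).foldl (fun d r =>
    (PySem.List.pyRange 0 cols 1).foldl (fun d c =>
      (drFindA al rows cols (rows.toNat * cols.toNat) (r, c) d).2) d) PySem.Dict.empty

def drTailA (rows cols : Int) (D : PySem.Dict (Int × Int) (Int × Int)) : List (List Int) :=
  (PySem.List.pyRange 0 rows 1).map fun r =>
    (PySem.List.pyRange 0 cols 1).map fun c =>
      (((PySem.List.pyRange 0 rows 1).foldl (fun bs r =>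
          (PySem.List.pyRange 0 cols 1).foldl (fun bs c =>
            let basin := (D.get? (r, c)).getD (r, c)
            let bs' := if bs.contains basin then bs else bs.insert basin (0 : Int)
            bs'.insert basin (bs'.getD basin 0 + 1)) bs) PySem.Dict.empty).get?
        ((D.get? (r, c)).getD (r, c))).getD 0

lemma drDest0_comp (al : List (List Int)) (rows cols : Int) :
    ∀ p ∈ drCells rows cols, (drDest0 al rows cols).get? p = some (drSink al rows cols p) := by
  have h := drNested_foldl
    (fun (d : PySem.Dict (Int × Int) (Int × Int)) r c =>
      (drFindA al rows cols (rows.toNat * cols.toNat) (r, c) d).2)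
    (PySem.List.pyRange 0 rows 1) (PySem.List.pyRange 0 cols 1) PySem.Dict.empty
  have hstep : (fun (d : PySem.Dict (Int × Int) (Int × Int)) (p : Int × Int) =>
      (drFindA al rows cols (rows.toNat * cols.toNat) (p.1, p.2) d).2)
      = fun d p => (drFindA al rows cols (rows.toNat * cols.toNat) p d).2 := by
    funext d p; rfl
  rw [drDest0, h, hstep]
  exact (drDestLoop al rows cols (drCells rows cols) PySem.Dict.empty
    (drEmptyInv al rows cols)).2.2

lemma drTailA_eq (al : List (List Int)) (rows cols : Int)
    (D : PySem.Dict (Int × Int) (Int × Int))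
    (hComp : ∀ p ∈ drCells rows cols, D.get? p = some (drSink al rows cols p)) :
    drTailA rows cols D = drOut al rows cols := by
  have hcells : (PySem.List.pyRange 0 rows 1).product (PySem.List.pyRange 0 cols 1)
      = drCells rows cols := rfl
  rw [drTailA, drNested_foldl (fun (bs : PySem.Dict (Int × Int) Int) r c =>
      let basin := (D.get? (r, c)).getD (r, c)
      let bs' := if bs.contains basin then bs else bs.insert basin (0 : Int)
      bs'.insert basin (bs'.getD basin 0 + 1)), hcells]
  have hfold := PySem.List.foldl_congr_mem (drCells rows cols)
      (fun (bs : PySem.Dict (Int × Int) Int) p =>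
        let basin := (D.get? (p.1, p.2)).getD (p.1, p.2)
        let bs' := if bs.contains basin then bs else bs.insert basin (0 : Int)
        bs'.insert basin (bs'.getD basin 0 + 1))
      (fun (bs : PySem.Dict (Int × Int) Int) p =>
        bs.insert (drSink al rows cols p)
          (bs.getD (drSink al rows cols p) 0 + 1))
      PySem.Dict.empty ?_
  · rw [hfold, ← List.foldl_map (f := drSink al rows cols)
      (g := fun (bs : PySem.Dict (Int × Int) Int) b => bs.insert b (bs.getD b 0 + 1))]
    simp only [drOut]
    apply List.map_congr_left
    intro r hr
    apply List.map_congr_left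
    intro c hc
    have hv : drValid rows cols (r, c) := by
      have h1 := PySem.List.mem_pyRange_one.mp hr
      have h2 := PySem.List.mem_pyRange_one.mp hc
      exact ⟨h1.1, h1.2, h2.1, h2.2⟩
    have hp : (r, c) ∈ drCells rows cols := (drMem_cells rows cols (r, c)).mpr hv
    have hb : (D.get? (r, c)).getD (r, c) = drSink al rows cols (r, c) := by
      rw [hComp _ hp]; rfl
    rw [hb, ← PySem.Dict.getD_eq_get?_getD, PySem.Dict.getD_foldl_insert_add_one,
      PySem.Dict.getD_empty, zero_add]
  · intro bs p hp
    have hb : (D.get? (p.1, p.2)).getD (p.1, p.2) = drSink al rows cols p := by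
      rw [show ((p.1, p.2) : Int × Int) = p from rfl, hComp _ hp]; rfl
    simp only [hb]
    exact drCstep_eq bs _

lemma drA_char (al : List (List Int)) :
    distribute_rainwater al = drOut al al.length (al.headD []).length := by
  have : distribute_rainwater al
      = drTailA (al.length : Int) ((al.headD [] : List Int).length : Int)
        (drDest0 al (al.length : Int) ((al.headD [] : List Int).length : Int)) := rfl
  rw [this]
  exact drTailA_eq al _ _ _ (drDest0_comp al _ _)

lemma drNxt_get? (al : List (List Int)) (rows cols : Int) (q : Int × Int) :
    (drNxt al rows cols).get? q
      = if q ∈ drCells rows cols then some (drLowestA al rows cols q.1 q.2) else none := by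
  have hstep : (fun (d : PySem.Dict (Int × Int) (Int × Int)) (p : Int × Int) =>
      d.insert (p.1, p.2) (drLowestB al rows cols p.1 p.2))
      = fun d p => d.insert p ((fun (x : Int × Int) => drLowestA al rows cols x.1 x.2) p) := by
    funext d p; rfl
  rw [drNxt, drNested_foldl (fun (d : PySem.Dict (Int × Int) (Int × Int)) r c =>
      d.insert (r, c) (drLowestB al rows cols r c)),
    show (PySem.List.pyRange 0 rows 1).product (PySem.List.pyRange 0 cols 1)
      = drCells rows cols from rfl, hstep,
    drGet?_foldl_insert (fun (x : Int × Int) => drLowestA al rows cols x.1 x.2),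
    PySem.Dict.get?_empty]

lemma drNxt_keys (al : List (List Int)) (rows cols : Int) :
    (drNxt al rows cols).keys = drCells rows cols := by
  have hstep : (fun (d : PySem.Dict (Int × Int) (Int × Int)) (p : Int × Int) =>
      d.insert (p.1, p.2) (drLowestB al rows cols p.1 p.2))
      = fun d p => d.insert p
          ((fun (d : PySem.Dict (Int × Int) (Int × Int)) (x : Int × Int) =>
            drLowestA al rows cols x.1 x.2) d p) := by
    funext d p; rfl
  rw [drNxt, drNested_foldl (fun (d : PySem.Dict (Int × Int) (Int × Int)) r c =>
      d.insert (r, c) (drLowestB al rows cols r c)),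
    show (PySem.List.pyRange 0 rows 1).product (PySem.List.pyRange 0 cols 1)
      = drCells rows cols from rfl, hstep,
    PySem.Dict.keys_foldl_insert, PySem.Dict.keys_empty, PySem.Set.update_nil_left]
  exact PySem.Set.ofList_eq_self_of_nodup _ (drNodup_cells rows cols)

lemma drNxtD (al : List (List Int)) (rows cols : Int) (cur : Int × Int)
    (hv : drValid rows cols cur) :
    (drNxt al rows cols).getD cur cur = drLowestA al rows cols cur.1 cur.2 := by
  rw [PySem.Dict.getD_eq_get?_getD, drNxt_get?, if_pos ((drMem_cells rows cols cur).mpr hv)]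
  rfl

lemma drChase_spec (al : List (List Int)) (rows cols : Int)
    (sink : PySem.Dict (Int × Int) (Int × Int)) :
    ∀ (fuel : Nat) (cur : Int × Int) (chain : List (Int × Int)),
      drValid rows cols cur → drM al rows cols cur ≤ fuel →
      drSink al rows cols (drChase (drNxt al rows cols) sink fuel cur chain).1
          = drSink al rows cols cur ∧
      drValid rows cols (drChase (drNxt al rows cols) sink fuel cur chain).1 ∧
      (sink.contains (drChase (drNxt al rows cols) sink fuel cur chain).1 = true ∨
        drLowestA al rows cols (drChase (drNxt al rows cols) sink fuel cur chain).1.1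
            (drChase (drNxt al rows cols) sink fuel cur chain).1.2
          = (drChase (drNxt al rows cols) sink fuel cur chain).1) ∧
      ∃ added, (drChase (drNxt al rows cols) sink fuel cur chain).2 = chain ++ added ∧
        ∀ p ∈ added, drValid rows cols p ∧
          drSink al rows cols p = drSink al rows cols cur := by
  intro fuel
  induction fuel with
  | zero =>
    intro cur chain hv hm
    have h0 : drChase (drNxt al rows cols) sink 0 cur chain = (cur, chain) := by
      conv_lhs => rw [drChase]
      split_ifs <;> rfl
    rw [h0]
    by_cases hc : (¬ sink.contains cur = true ∧ (drNxt al rows cols).getD cur cur ≠ cur)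
    · exfalso
      have hq : drLowestA al rows cols cur.1 cur.2 ≠ cur := by
        rw [← drNxtD al rows cols cur hv]; exact hc.2
      have := drM_next_lt al rows cols cur hq
      omega
    · rcases not_and_or.mp hc with h | h
      · exact ⟨rfl, hv, Or.inl (by revert h; simp), [], by simp⟩
      · refine ⟨rfl, hv, Or.inr ?_, [], by simp⟩
        rw [← drNxtD al rows cols cur hv]
        exact not_not.mp h
  | succ fuel ih =>
    intro cur chain hv hm
    by_cases hc : (¬ sink.contains cur = true ∧ (drNxt al rows cols).getD cur cur ≠ cur)
    · have hq : drLowestA al rows cols cur.1 cur.2 ≠ cur := by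
        rw [← drNxtD al rows cols cur hv]; exact hc.2
      have hEq : drChase (drNxt al rows cols) sink (fuel + 1) cur chain
          = drChase (drNxt al rows cols) sink fuel
              ((drNxt al rows cols).getD cur cur) (chain ++ [cur]) := by
        conv_lhs => rw [drChase]
        rw [if_pos hc]
      have hvn : drValid rows cols (drLowestA al rows cols cur.1 cur.2) := by
        rcases drLowest_spec al rows cols cur.1 cur.2 with heq | ⟨hv', _⟩
        · exact absurd (by simpa using heq) hq
        · exact hv'
      have hmn : drM al rows cols (drLowestA al rows cols cur.1 cur.2) ≤ fuel := by
        have := drM_next_lt al rows cols cur hq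
        omega
      have hnd := drNxtD al rows cols cur hv
      rw [hEq, hnd]
      obtain ⟨g1, g2, g3, added, g4, g5⟩ :=
        ih (drLowestA al rows cols cur.1 cur.2) (chain ++ [cur]) hvn hmn
      have hss : drSink al rows cols (drLowestA al rows cols cur.1 cur.2)
          = drSink al rows cols cur := (drSink_step al rows cols cur hq).symm
      refine ⟨g1.trans hss, g2, g3, cur :: added, by simpa using g4, ?_⟩
      intro p hp
      rcases List.mem_cons.mp hp with rfl | hp
      · exact ⟨hv, rfl⟩
      · exact ⟨(g5 p hp).1, (g5 p hp).2.trans hss⟩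
    · have hEq : drChase (drNxt al rows cols) sink (fuel + 1) cur chain = (cur, chain) := by
        conv_lhs => rw [drChase]
        rw [if_neg hc]
      rw [hEq]
      rcases not_and_or.mp hc with h | h
      · exact ⟨rfl, hv, Or.inl (by revert h; simp), [], by simp⟩
      · refine ⟨rfl, hv, Or.inr ?_, [], by simp⟩
        rw [← drNxtD al rows cols cur hv]
        exact not_not.mp h

def drBStep (al : List (List Int)) (rows cols : Int)
    (sink : PySem.Dict (Int × Int) (Int × Int)) (cell : Int × Int) :
    PySem.Dict (Int × Int) (Int × Int) :=
  let cc := drChase (drNxt al rows cols) sink (rows.toNat * cols.toNat) cell []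
  let s := (sink.get? cc.1).getD cc.1
  let sink' := cc.2.foldl (fun sk p => sk.insert p s) sink
  sink'.insert cell s

def drSinkD (al : List (List Int)) (rows cols : Int) :
    PySem.Dict (Int × Int) (Int × Int) :=
  (drNxt al rows cols).keys.foldl (drBStep al rows cols) PySem.Dict.empty

def drTailB (rows cols : Int) (S : PySem.Dict (Int × Int) (Int × Int)) : List (List Int) :=
  (PySem.List.pyRange 0 rows 1).map fun r =>
    (PySem.List.pyRange 0 cols 1).map fun c =>
      (((S.values.foldl (fun cnt s => cnt.insert s (cnt.getD s 0 + 1))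
          (PySem.Dict.empty : PySem.Dict (Int × Int) Int)).get?
        ((S.get? (r, c)).getD (r, c))).getD 0)

lemma drBStep_spec (al : List (List Int)) (rows cols : Int)
    (sink : PySem.Dict (Int × Int) (Int × Int)) (cell : Int × Int)
    (hI : drInv al rows cols sink) (hnd : sink.keys.Nodup)
    (hkv : ∀ k ∈ sink.keys, drValid rows cols k) (hcv : drValid rows cols cell) :
    drInv al rows cols (drBStep al rows cols sink cell) ∧
    (drBStep al rows cols sink cell).keys.Nodup ∧
    (∀ k ∈ (drBStep al rows cols sink cell).keys, drValid rows cols k) ∧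
    (∀ q w, sink.get? q = some w → (drBStep al rows cols sink cell).get? q = some w) ∧
    (drBStep al rows cols sink cell).get? cell = some (drSink al rows cols cell) := by
  obtain ⟨h1, h2, h3, added, h4, h5⟩ :=
    drChase_spec al rows cols sink (rows.toNat * cols.toNat) cell [] hcv
      (drM_le al rows cols cell)
  set cc := drChase (drNxt al rows cols) sink (rows.toNat * cols.toNat) cell [] with hcc
  have hs : (sink.get? cc.1).getD cc.1 = drSink al rows cols cell := by
    cases hg : sink.get? cc.1 with
    | some v =>
      have hv' := hI cc.1 v hg
      simp only [Option.getD_some]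
      rw [hv', h1]
    | none =>
      rcases h3 with h | h
      · rw [PySem.Dict.contains_eq_isSome_get?, hg] at h
        simp at h
      · simp only [Option.getD_none]
        rw [← h1, drSink_self al rows cols cc.1 h]
  have hget : ∀ q, (drBStep al rows cols sink cell).get? q
      = if q = cell then some (drSink al rows cols cell)
        else if q ∈ cc.2 then some (drSink al rows cols cell)
        else sink.get? q := by
    intro q
    show ((cc.2.foldl (fun sk p => sk.insert p ((sink.get? cc.1).getD cc.1)) sink).insert cell
        ((sink.get? cc.1).getD cc.1)).get? q = _
    rw [PySem.Dict.get?_insert,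
      drGet?_foldl_insert (fun _ => (sink.get? cc.1).getD cc.1), hs]
  have hkeys : ∀ q, q ∈ (drBStep al rows cols sink cell).keys ↔
      (q = cell ∨ q ∈ cc.2 ∨ q ∈ sink.keys) := by
    intro q
    show q ∈ ((cc.2.foldl (fun sk p => sk.insert p ((sink.get? cc.1).getD cc.1)) sink).insert cell
        ((sink.get? cc.1).getD cc.1)).keys ↔ _
    rw [PySem.Dict.mem_keys_insert, PySem.Dict.keys_foldl_insert, PySem.Set.mem_update]
    tauto
  refine ⟨?_, ?_, ?_, ?_, ?_⟩
  · intro q v hq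
    rw [hget q] at hq
    split_ifs at hq with he1 he2
    · subst he1; exact (Option.some_inj.mp hq).symm
    · have hq' : q ∈ added := by rw [h4] at he2; simpa using he2
      rw [(h5 q hq').2]
      exact (Option.some_inj.mp hq).symm
    · exact hI q v hq
  · show ((cc.2.foldl (fun sk p => sk.insert p ((sink.get? cc.1).getD cc.1)) sink).insert cell
        ((sink.get? cc.1).getD cc.1)).keys.Nodup
    exact PySem.Dict.nodup_keys_insert _ _ _
      (PySem.Dict.nodup_keys_foldl_insert cc.2 (fun _ _ => (sink.get? cc.1).getD cc.1) sink hnd)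
  · intro k hk
    rcases (hkeys k).mp hk with rfl | hk | hk
    · exact hcv
    · have hk' : k ∈ added := by rw [h4] at hk; simpa using hk
      exact (h5 k hk').1
    · exact hkv k hk
  · intro q w hq
    rw [hget q]
    split_ifs with he1 he2
    · subst he1
      rw [hI q w hq]
    · have hq' : q ∈ added := by rw [h4] at he2; simpa using he2
      rw [hI q w hq, (h5 q hq').2]
    · exact hq
  · rw [hget cell]
    simp

lemma drSinkLoop (al : List (List Int)) (rows cols : Int) :
    ∀ (l : List (Int × Int)), (∀ p ∈ l, drValid rows cols p) →
    ∀ sink, drInv al rows cols sink → sink.keys.Nodup →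
      (∀ k ∈ sink.keys, drValid rows cols k) →
      drInv al rows cols (l.foldl (drBStep al rows cols) sink) ∧
      (l.foldl (drBStep al rows cols) sink).keys.Nodup ∧
      (∀ k ∈ (l.foldl (drBStep al rows cols) sink).keys, drValid rows cols k) ∧
      (∀ q w, sink.get? q = some w →
        (l.foldl (drBStep al rows cols) sink).get? q = some w) ∧
      (∀ cell ∈ l,
        (l.foldl (drBStep al rows cols) sink).get? cell
          = some (drSink al rows cols cell)) := by
  intro l
  induction l with
  | nil => intro _ sink hI hnd hkv; exact ⟨hI, hnd, hkv, fun q w h => h, by simp⟩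
  | cons p l ih =>
    intro hlv sink hI hnd hkv
    obtain ⟨s1, s2, s3, s4, s5⟩ :=
      drBStep_spec al rows cols sink p hI hnd hkv (hlv p (by simp))
    obtain ⟨g1, g2, g3, g4, g5⟩ :=
      ih (fun q hq => hlv q (by simp [hq])) (drBStep al rows cols sink p) s1 s2 s3
    refine ⟨g1, g2, g3, ?_, ?_⟩
    · intro q w hq
      exact g4 q w (s4 q w hq)
    · intro cell hc
      rcases List.mem_cons.mp hc with rfl | hc
      · exact g4 cell _ s5
      · exact g5 cell hc

lemma drTailB_eq (al : List (List Int)) (rows cols : Int)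
    (S : PySem.Dict (Int × Int) (Int × Int))
    (hnd : S.keys.Nodup) (hkv : ∀ k ∈ S.keys, drValid rows cols k)
    (hComp : ∀ p ∈ drCells rows cols, S.get? p = some (drSink al rows cols p)) :
    drTailB rows cols S = drOut al rows cols := by
  have hmem : ∀ q, q ∈ S.keys ↔ q ∈ drCells rows cols := by
    intro q
    constructor
    · intro h; exact (drMem_cells rows cols q).mpr (hkv q h)
    · intro h
      by_contra hnk
      rw [← PySem.Dict.get?_eq_none_iff_not_mem_keys] at hnk
      rw [hComp q h] at hnk
      cases hnk
  have hperm : S.keys.Perm (drCells rows cols) :=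
    (List.perm_ext_iff_of_nodup hnd (drNodup_cells rows cols)).mpr hmem
  have hvals : S.values = S.keys.map (drSink al rows cols) := by
    rw [PySem.Dict.values_eq_map_keys S hnd ((0 : Int), (0 : Int))]
    apply List.map_congr_left
    intro k hk
    rw [PySem.Dict.getD_eq_get?_getD, hComp k ((hmem k).mp hk)]
    rfl
  rw [drTailB, drOut]
  apply List.map_congr_left
  intro r hr
  apply List.map_congr_left
  intro c hc
  have hv : drValid rows cols (r, c) := by
    have h1 := PySem.List.mem_pyRange_one.mp hr
    have h2 := PySem.List.mem_pyRange_one.mp hc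
    exact ⟨h1.1, h1.2, h2.1, h2.2⟩
  have hp : (r, c) ∈ drCells rows cols := (drMem_cells rows cols (r, c)).mpr hv
  have hb : (S.get? (r, c)).getD (r, c) = drSink al rows cols (r, c) := by
    rw [hComp _ hp]; rfl
  rw [hb, ← PySem.Dict.getD_eq_get?_getD, PySem.Dict.getD_foldl_insert_add_one,
    PySem.Dict.getD_empty, zero_add, hvals,
    List.Perm.count (hperm.map (drSink al rows cols)) (drSink al rows cols (r, c))]

lemma drB_char (al : List (List Int)) :
    distribute_rainwater_alt al = drOut al al.length (al.headD []).length := by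
  have h0 : distribute_rainwater_alt al
      = drTailB (al.length : Int) ((al.headD [] : List Int).length : Int)
          (drSinkD al (al.length : Int) ((al.headD [] : List Int).length : Int)) := rfl
  set rows : Int := (al.length : Int)
  set cols : Int := ((al.headD [] : List Int).length : Int)
  obtain ⟨_, S2, S3, _, S5⟩ := drSinkLoop al rows cols (drCells rows cols)
    (fun p hp => (drMem_cells rows cols p).mp hp) PySem.Dict.empty
    (drEmptyInv al rows cols) (by rw [PySem.Dict.keys_empty]; exact List.nodup_nil)
    (by rw [PySem.Dict.keys_empty]; simp)
  have hSdef : drSinkD al rows cols = (drCells rows cols).foldl (drBStep al rows cols)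
      PySem.Dict.empty := by
    rw [drSinkD, drNxt_keys]
  rw [h0, hSdef]
  exact drTailB_eq al rows cols _ S2 S3 S5

-- ===== VERDICT (by name: the statement is the Claim_ definition above) =====
theorem distribute_rainwater_spec : Claim_equal_distribute_rainwater := by
  intro al _ _
  unfold Spec_distribute_rainwater
  rw [drA_char, drB_char]
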